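-- pv_equiv track=rewrite | github.com/L3nn1x/logicGates | LogicGates.py | NOR
-- ===== SOURCE A (Python) =====
-- def NOR(*objects_):
--     booleans = []
--
--     for ob in list(objects_).pop():
--         if ob:
--             booleans.append(True)
--         if not ob:
--             booleans.append(False)
--
--     if False in booleans and True not in booleans:
--         return True
--     elif True in booleans and False in booleans:
--         return False
--     elif True in booleans and False not in booleans:
--         return False
-- ===== SOURCE B (Python) =====
-- def NOR(*objects_):
--     # Idiomatic: NOR is "no element is truthy"; empty iterable yields None.
--     vals = list(list(objects_).pop())
--     if not vals:
--         return None
--     return not any(vals)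
-- ===== Notes on version B (the rewrite author's own statement) =====
-- stated objective: idiomatic
-- what changed: Replaces A's build-a-list-then-three-membership-tests decision table with an emptiness check followed by a single short-circuiting not any(vals); no intermediate booleans list or branch chain.
import Mathlib
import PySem

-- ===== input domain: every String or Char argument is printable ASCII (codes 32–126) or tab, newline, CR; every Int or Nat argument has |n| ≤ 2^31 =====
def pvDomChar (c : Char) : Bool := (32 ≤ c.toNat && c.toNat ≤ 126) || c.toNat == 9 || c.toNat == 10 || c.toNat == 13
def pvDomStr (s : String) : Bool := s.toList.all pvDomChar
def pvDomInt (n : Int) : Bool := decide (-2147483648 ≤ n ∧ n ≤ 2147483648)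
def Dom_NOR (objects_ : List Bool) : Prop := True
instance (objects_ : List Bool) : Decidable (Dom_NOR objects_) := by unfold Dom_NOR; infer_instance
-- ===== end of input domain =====

-- B replaces A's intermediate list and membership-test decision table with `not any(vals)` after an emptiness check (idiomatic).
-- ===== PORT A =====
def NOR (objects_ : List Bool) : Option Bool :=
  let booleans : List Bool := objects_.foldl
    (fun acc ob =>
      let acc := if ob then acc ++ [true] else acc
      if !ob then acc ++ [false] else acc) []
  if booleans.contains false && !(booleans.contains true) then some true
  else if booleans.contains true && booleans.contains false then some false
  else if booleans.contains true && !(booleans.contains false) then some false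
  else none

-- ===== PORT B =====
def NOR_alt (objects_ : List Bool) : Option Bool :=
  if objects_.isEmpty then none
  else some (!(objects_.any id))

-- ===== PRECONDITION & SPEC =====
def Spec_NOR (objects_ : List Bool) (out : Option Bool) : Prop := out = NOR_alt objects_
instance (objects_ : List Bool) (out : Option Bool) : Decidable (Spec_NOR objects_ out) := by unfold Spec_NOR; infer_instance

-- ===== CLAIM =====
def Claim_equal_NOR : Prop := ∀ (objects_ : List Bool), Dom_NOR objects_ → Spec_NOR objects_ (NOR objects_)

-- ===== LEMMAS AND PROOFS =====
theorem NOR_foldl_A (xs : List Bool) (acc : List Bool) :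
    xs.foldl (fun acc ob =>
      let acc := if ob then acc ++ [true] else acc
      if !ob then acc ++ [false] else acc) acc = acc ++ xs := by
  induction xs generalizing acc with
  | nil => simp
  | cons x xs ih =>
    rw [List.foldl_cons, ih]
    cases x <;> simp

-- ===== VERDICT =====
theorem NOR_spec : Claim_equal_NOR := by
  intro xs _
  unfold Spec_NOR NOR NOR_alt
  rw [NOR_foldl_A]
  cases xs with
  | nil => simp
  | cons x xs =>
    by_cases hT : true ∈ x :: xs <;> by_cases hF : false ∈ x :: xs <;>
      cases x <;> simp_all [List.any_eq_true]
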